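-- pv_equiv track=rewrite | github.com/Aliossandro/who_models_the_world_submission_1161_cscw | depthComputer.py | DFS
-- ===== SOURCE A (Python) =====
-- def DFS(G,v,seen=None,path=None):
--     if seen is None: seen = set()
--     if path is None: path = [v]
--     seen.add(v)
--     paths = []
--     for t in G[v]:
--         if t not in seen:
--             t_path = path + [t]
--             paths.append(tuple(t_path))
--             paths.extend(DFS(G, t, seen, t_path))
--     return paths
-- ===== SOURCE B (Python) =====
-- def DFS(G, v, seen=None, path=None):
--     # Iterative DFS: explicit stack of (vertex, path) frames, mark-at-pop,
--     # neighbors pushed in reversed order so discovery order matches the recursion.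
--     if seen is None: seen = set()
--     if path is None: path = [v]
--     seen.add(v)
--     out = []
--     stack = [(t, path + [t]) for t in reversed(G[v])]
--     while stack:
--         u, p = stack.pop()
--         if u in seen:
--             continue
--         seen.add(u)
--         out.append(tuple(p))
--         stack.extend((t, p + [t]) for t in reversed(G[u]))
--     return out
-- ===== Notes on version B (the rewrite author's own statement) =====
-- stated objective: alternative
-- what changed: Replaced the recursion by an iterative DFS with an explicit stack of (vertex, path) frames and mark-at-pop semantics, pushing neighbors in reversed order so the discovery sequence matches the recursion.
import Mathlib
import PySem

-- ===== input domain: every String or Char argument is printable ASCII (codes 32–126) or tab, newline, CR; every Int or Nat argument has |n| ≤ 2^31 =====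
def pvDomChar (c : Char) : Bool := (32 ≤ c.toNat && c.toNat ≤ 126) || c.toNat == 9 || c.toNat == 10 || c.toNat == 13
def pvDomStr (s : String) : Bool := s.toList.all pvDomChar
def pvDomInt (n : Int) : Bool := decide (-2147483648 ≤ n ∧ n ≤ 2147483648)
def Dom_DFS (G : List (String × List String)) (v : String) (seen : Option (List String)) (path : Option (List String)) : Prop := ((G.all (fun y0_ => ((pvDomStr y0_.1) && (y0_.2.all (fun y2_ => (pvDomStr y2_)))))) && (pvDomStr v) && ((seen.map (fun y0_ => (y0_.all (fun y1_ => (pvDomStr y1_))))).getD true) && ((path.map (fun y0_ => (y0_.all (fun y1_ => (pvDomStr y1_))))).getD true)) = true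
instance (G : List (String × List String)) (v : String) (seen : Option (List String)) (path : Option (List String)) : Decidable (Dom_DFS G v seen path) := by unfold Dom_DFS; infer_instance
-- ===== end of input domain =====

-- B replaces A's recursion by an explicit stack of (vertex, path) frames with mark-at-pop
-- (objective: alternative, same cost); equivalence is about the RETURN value — both Pythons
-- also mutate the caller's `seen` set, and they add exactly the same elements to it.

-- ===== PORT A =====
-- G[v]: first-match association-list lookup (Python dict); exact when the key is present (Pre_).
def pvAdj : List (String × List String) → String → List String
  | [], _ => []
  | (k, ns) :: rest, u => if k == u then ns else pvAdj rest u

-- all vertices mentioned in G (keys and targets); only used to size the fuel of the ports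
def pvVerts (G : List (String × List String)) : List String := G.flatMap (fun e => e.1 :: e.2)

-- A's recursion, transliterated; the Nat fuel and the `min` are totality guards only
-- (fuel is consumed once per visited vertex, and (pvVerts G).length + 2 is always enough).
mutual
def pvVisitA (G : List (String × List String)) : Nat → String → PySem.Set String → List String → Nat × PySem.Set String × List (List String)
  | 0, _, s, _ => (0, s, [])
  | f + 1, v, s, p => pvLoopA G f (pvAdj G v) (PySem.Set.add s v) p
  termination_by f v s p => (f, 0)
  decreasing_by
    exact Prod.Lex.left _ _ (Nat.lt_succ_self f)

-- the `for t in G[v]` loop: threads (fuel, seen, paths-so-far)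
def pvLoopA (G : List (String × List String)) : Nat → List String → PySem.Set String → List String → Nat × PySem.Set String × List (List String)
  | f, [], s, _ => (f, s, [])
  | f, t :: ts, s, p =>
    if PySem.Set.contains s t then pvLoopA G f ts s p
    else
      let r := pvVisitA G f t s (p ++ [t])
      let r2 := pvLoopA G (min r.1 f) ts r.2.1 p
      (r2.1, r2.2.1, (p ++ [t]) :: (r.2.2 ++ r2.2.2))
  termination_by f ts s p => (f, ts.length + 1)
  decreasing_by
    · exact Prod.Lex.right _ (Nat.lt_succ_self _)
    · exact Prod.Lex.right _ (Nat.succ_pos _)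
    · rcases Nat.lt_or_ge (min r.1 f) f with h | h
      · exact Prod.Lex.left _ _ h
      · have : min r.1 f = f := Nat.le_antisymm (Nat.min_le_right _ _) h
        rw [this]; exact Prod.Lex.right _ (Nat.lt_succ_self _)
end

def DFS (G : List (String × List String)) (v : String) (seen : Option (List String)) (path : Option (List String)) : List (List String) :=
  let s := PySem.Set.ofList (seen.getD [])
  let p := path.getD [v]
  (pvVisitA G ((pvVerts G).length + 2) v s p).2.2

-- ===== PORT B =====
-- the `while stack` loop; stack is modeled with its top at the HEAD, so Python's
-- `extend(reversed(G[u]))` + `pop()` from the end becomes consing the neighbors in order.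
-- Nat fuel (one unit per pop) is a totality guard only; (pvVerts G).length + 2 is always enough.
def pvLoopB (G : List (String × List String)) : Nat → PySem.Set String → List (String × List String) → List (List String) → List (List String)
  | 0, _, _, out => out
  | f + 1, s, stack, out =>
    match stack with
    | [] => out
    | (u, p) :: rest =>
      if PySem.Set.contains s u then pvLoopB G f s rest out
      else pvLoopB G f (PySem.Set.add s u) (((pvAdj G u).map (fun t => (t, p ++ [t]))) ++ rest) (out ++ [p])

def DFS_alt (G : List (String × List String)) (v : String) (seen : Option (List String)) (path : Option (List String)) : List (List String) :=
  let s := PySem.Set.ofList (seen.getD [])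
  let p := path.getD [v]
  pvLoopB G ((pvVerts G).length + 2) (PySem.Set.add s v) ((pvAdj G v).map (fun t => (t, p ++ [t]))) []

-- ===== PRECONDITION & SPEC =====
-- keys of G, and the set of vertices the recursion can reach from v through vertices
-- outside seen ∪ {v}: a bounded breadth-first closure (a plain graph-reachability
-- property of the input, computed layer by layer; it does not track paths or output).
def pvKeys (G : List (String × List String)) : List String := G.map (fun e => e.1)

def pvReach (G : List (String × List String)) (v : String) (seen : Option (List String)) : List String :=
  let adj := fun u => ((G.lookup u).getD [])
  let avoid := v :: seen.getD []
  (List.range ((pvVerts G).length)).foldl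
    (fun cur _ => PySem.List.dedup
      (cur ++ ((cur.flatMap adj).filter (fun t => !(avoid.contains t) && !(cur.contains t)))))
    (PySem.List.dedup ((adj v).filter (fun t => !(avoid.contains t))))

-- Pre_ excludes exactly the inputs where Python A raises KeyError: v missing from G, or
-- some vertex actually visited (reachable from v through vertices outside seen ∪ {v})
-- missing from G. Everywhere A returns a value, Pre_ holds.
def Pre_DFS (G : List (String × List String)) (v : String) (seen : Option (List String)) (path : Option (List String)) : Prop :=
  (v ∈ pvKeys G) ∧ ∀ t ∈ pvReach G v seen, t ∈ pvKeys G
instance (G : List (String × List String)) (v : String) (seen : Option (List String)) (path : Option (List String)) : Decidable (Pre_DFS G v seen path) := by unfold Pre_DFS; infer_instance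

def pvWitness_DFS : (List (String × List String)) × String × Option (List String) × Option (List String) :=
  ([("a", ["b", "c"]), ("b", ["c", "x"]), ("c", [])], "a", some ["x"], none)

def Spec_DFS (G : List (String × List String)) (v : String) (seen : Option (List String)) (path : Option (List String)) (out : List (List String)) : Prop := out = DFS_alt G v seen path
instance (G : List (String × List String)) (v : String) (seen : Option (List String)) (path : Option (List String)) (out : List (List String)) : Decidable (Spec_DFS G v seen path out) := by unfold Spec_DFS; infer_instance

-- ===== CLAIM (what is proved, stated in full; the proofs are below) =====
def Claim_equal_DFS : Prop := ∀ (G : List (String × List String)) (v : String) (seen : Option (List String)) (path : Option (List String)), Dom_DFS G v seen path → Pre_DFS G v seen path → Spec_DFS G v seen path (DFS G v seen path)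

-- ===== LEMMAS AND PROOFS =====

-- reference loop used only by the proofs: processes a list of (vertex, path) frames
-- sequentially with A's recursion; structural in the frame list.
def pvGen (G : List (String × List String)) : Nat → PySem.Set String → List (String × List String) → Nat × PySem.Set String × List (List String)
  | f, s, [] => (f, s, [])
  | f, s, (u, p) :: rest =>
    if PySem.Set.contains s u then pvGen G f s rest
    else
      let r := pvVisitA G f u s p
      let r2 := pvGen G (min r.1 f) r.2.1 rest
      (r2.1, r2.2.1, p :: (r.2.2 ++ r2.2.2))

theorem pvLoopA_eq_pvGen (G : List (String × List String)) (ts : List String) (f : Nat) (s : PySem.Set String) (p : List String) :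
    pvLoopA G f ts s p = pvGen G f s (ts.map (fun t => (t, p ++ [t]))) := by
  induction ts generalizing f s with
  | nil => simp [pvLoopA, pvGen]
  | cons t ts ih =>
    by_cases h : t ∈ s
    · simp [pvLoopA, pvGen, h, ih]
    · simp [pvLoopA, pvGen, h, ih]

theorem pvGen_fuel_le (G : List (String × List String)) (fr : List (String × List String)) (f : Nat) (s : PySem.Set String) :
    (pvGen G f s fr).1 ≤ f := by
  induction fr generalizing f s with
  | nil => simp [pvGen]
  | cons x fr ih =>
    obtain ⟨u, p⟩ := x
    by_cases h : u ∈ s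
    · simpa [pvGen, h] using ih f s
    · simp only [pvGen]
      rw [if_neg (by simp [h])]
      exact le_trans (ih _ _) (Nat.min_le_right _ _)

theorem pvGen_append (G : List (String × List String)) (xs ys : List (String × List String)) (f : Nat) (s : PySem.Set String) :
    pvGen G f s (xs ++ ys) =
      ((pvGen G (pvGen G f s xs).1 (pvGen G f s xs).2.1 ys).1,
       (pvGen G (pvGen G f s xs).1 (pvGen G f s xs).2.1 ys).2.1,
       (pvGen G f s xs).2.2 ++ (pvGen G (pvGen G f s xs).1 (pvGen G f s xs).2.1 ys).2.2) := by
  induction xs generalizing f s with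
  | nil => simp [pvGen]
  | cons x xs ih =>
    obtain ⟨u, p⟩ := x
    by_cases h : u ∈ s
    · simp [pvGen, h, ih]
    · simp [pvGen, h, ih]

-- vertices: the dedup'd vertex list and the two fuel-accounting quantities
def pvV (G : List (String × List String)) : List String := PySem.List.dedup (pvVerts G)
def pvCardU (G : List (String × List String)) (s : PySem.Set String) : Nat :=
  ((pvV G).filter (fun x => !(PySem.Set.contains s x))).length
def pvW (G : List (String × List String)) (s : PySem.Set String) : Nat :=
  (((pvV G).filter (fun x => !(PySem.Set.contains s x))).map (fun u => (pvAdj G u).length)).sum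

theorem pvAdj_mem_verts (G : List (String × List String)) (u t : String) (h : t ∈ pvAdj G u) : t ∈ pvVerts G := by
  induction G with
  | nil => simp [pvAdj] at h
  | cons e G ih =>
    obtain ⟨k, ns⟩ := e
    simp only [pvAdj] at h
    by_cases hk : k == u
    · rw [if_pos hk] at h
      simp only [pvVerts, List.flatMap_cons, List.mem_append, List.mem_cons]
      exact Or.inl (Or.inr h)
    · rw [if_neg hk] at h
      simp only [pvVerts, List.flatMap_cons, List.mem_append, List.mem_cons]
      exact Or.inr (ih h)

theorem pvAdj_nil_of_not_mem (G : List (String × List String)) (u : String) (h : u ∉ pvVerts G) : pvAdj G u = [] := by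
  induction G with
  | nil => rfl
  | cons e G ih =>
    obtain ⟨k, ns⟩ := e
    simp only [pvVerts, List.flatMap_cons, List.mem_append, List.mem_cons, not_or] at h
    simp only [pvAdj]
    have hk : ¬ (k == u) := by
      intro hkv
      exact h.1.1 (by simpa using (beq_iff_eq.mp hkv).symm)
    rw [if_neg hk]
    exact ih (by intro hm; exact h.2 hm)

theorem pvV_nodup (G : List (String × List String)) : (pvV G).Nodup := by
  simp [pvV]

theorem mem_pvV (G : List (String × List String)) (x : String) : x ∈ pvV G ↔ x ∈ pvVerts G := by
  simp [pvV]

-- filtering out the freshly added vertex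
theorem filter_add_eq (l : List String) (s : PySem.Set String) (u : String) :
    l.filter (fun x => !(PySem.Set.contains (PySem.Set.add s u) x)) =
      (l.filter (fun x => !(PySem.Set.contains s x))).filter (fun x => x != u) := by
  rw [List.filter_filter]
  apply List.filter_congr
  intro x _
  have hmem : x ∈ PySem.Set.add s u ↔ x ∈ s ∨ x = u :=
    PySem.Set.mem_add (s := s) (x := u) (y := x)
  by_cases hxs : x ∈ s
  · simp [hmem.mpr (Or.inl hxs), hxs]
  · by_cases hxu : x = u
    · simp [hxu]
    · have hx : x ∉ PySem.Set.add s u := fun h => by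
        rcases hmem.mp h with h' | h'
        · exact hxs h'
        · exact hxu h'
      simp [hx, hxs, hxu]

theorem unseen_perm (G : List (String × List String)) (s : PySem.Set String) (u : String)
    (huV : u ∈ pvV G) (hus : u ∉ s) :
    ((pvV G).filter (fun x => !(PySem.Set.contains s x))).Perm
      (u :: ((pvV G).filter (fun x => !(PySem.Set.contains s x))).filter (fun x => x != u)) := by
  set m := (pvV G).filter (fun x => !(PySem.Set.contains s x)) with hm
  have hum : u ∈ m := by
    rw [hm]
    apply List.mem_filter.mpr
    exact ⟨huV, by simp [hus]⟩
  have hnd : m.Nodup := List.Nodup.filter _ (pvV_nodup G)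
  have herase : m.erase u = m.filter (fun x => x != u) := hnd.erase_eq_filter u
  have := List.perm_cons_erase hum
  rwa [herase] at this

theorem pvCardU_add (G : List (String × List String)) (s : PySem.Set String) (u : String)
    (huV : u ∈ pvV G) (hus : u ∉ s) :
    pvCardU G s = pvCardU G (PySem.Set.add s u) + 1 := by
  have hlen := (unseen_perm G s u huV hus).length_eq
  simp only [List.length_cons] at hlen
  rw [pvCardU, pvCardU, filter_add_eq, hlen]

theorem pvW_add (G : List (String × List String)) (s : PySem.Set String) (u : String)
    (huV : u ∈ pvV G) (hus : u ∉ s) :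
    pvW G s = (pvAdj G u).length + pvW G (PySem.Set.add s u) := by
  have hsum := ((unseen_perm G s u huV hus).map (fun x => (pvAdj G x).length)).sum_eq
  simp only [List.map_cons, List.sum_cons] at hsum
  rw [pvW, pvW, filter_add_eq, hsum]

-- total adjacency mass over the distinct vertices
def pvT (G : List (String × List String)) : Nat := ((pvV G).map (fun u => (pvAdj G u).length)).sum

theorem sum_adj_le (G : List (String × List String)) : ∀ (l : List String), l.Nodup →
    ((l.map (fun u => (pvAdj G u).length)).sum ≤ (G.map (fun e => e.2.length)).sum) := by
  induction G with
  | nil => intro l _; simp [pvAdj]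
  | cons e G ih =>
    obtain ⟨k, ns⟩ := e
    intro l hnd
    have step : ∀ (l : List String), l.Nodup →
        ((l.map (fun u => (pvAdj ((k, ns) :: G) u).length)).sum) ≤
          ns.length + (((l.filter (fun x => x != k)).map (fun u => (pvAdj G u).length)).sum) := by
      intro l hnd
      induction l with
      | nil => simp
      | cons a l ihl =>
        have hnotin : a ∉ l := (List.nodup_cons.mp hnd).1
        have hnd' : l.Nodup := (List.nodup_cons.mp hnd).2
        have hrest := ihl hnd'
        by_cases hak : a = k
        · subst hak
          have hfilter : l.filter (fun x => x != a) = l :=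
            List.filter_eq_self.mpr (fun x hx => bne_iff_ne.mpr (fun hxa => hnotin (hxa ▸ hx)))
          have hmapeq : (l.map (fun u => (pvAdj ((a, ns) :: G) u).length)) =
              (l.map (fun u => (pvAdj G u).length)) := by
            apply List.map_congr_left
            intro x hx
            have hxk : ¬ (a == x) := fun hc => hnotin ((beq_iff_eq.mp hc) ▸ hx)
            rw [pvAdj, if_neg hxk]
          rw [List.map_cons, List.sum_cons, hmapeq, List.filter_cons]
          rw [pvAdj, if_pos (BEq.rfl)]
          simp only [bne_self_eq_false, Bool.false_eq_true, if_false, hfilter]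
          have hle : (l.map (fun u => (pvAdj G u).length)).sum ≤
              ((l.filter (fun x => x != a)).map (fun u => (pvAdj G u).length)).sum := by
            rw [hfilter]
          omega
        · have hka : ¬ (k == a) := fun hc => hak (beq_iff_eq.mp hc).symm
          rw [List.map_cons, List.sum_cons, List.filter_cons]
          rw [pvAdj, if_neg hka]
          have hane : (a != k) = true := bne_iff_ne.mpr hak
          rw [hane, if_pos rfl, List.map_cons, List.sum_cons]
          omega
    calc ((l.map (fun u => (pvAdj ((k, ns) :: G) u).length)).sum)
        ≤ ns.length + (((l.filter (fun x => x != k)).map (fun u => (pvAdj G u).length)).sum) :=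
          step l hnd
      _ ≤ ns.length + ((G.map (fun e => e.2.length)).sum) := by
            have := ih (l.filter (fun x => x != k)) (hnd.filter _)
            omega
      _ = (((k, ns) :: G).map (fun e => e.2.length)).sum := by simp

theorem pvT_le (G : List (String × List String)) : pvT G ≤ (pvVerts G).length := by
  have h1 : pvT G ≤ (G.map (fun e => e.2.length)).sum := sum_adj_le G (pvV G) (pvV_nodup G)
  have h2 : (G.map (fun e => e.2.length)).sum ≤ (pvVerts G).length := by
    rw [pvVerts, List.length_flatMap]
    apply List.sum_le_sum
    intro e _
    simp
  omega

theorem pvCardU_le (G : List (String × List String)) (s : PySem.Set String) :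
    pvCardU G s ≤ (pvVerts G).length := by
  calc pvCardU G s ≤ (pvV G).length := List.length_filter_le _ _
    _ ≤ (pvVerts G).length := by
        simpa [pvV, PySem.List.dedup_eq_ofList] using PySem.Set.length_ofList_le (xs := pvVerts G)

-- sum over the unseen vertices is bounded by the total mass, even after excluding u
theorem pvW_le_sub (G : List (String × List String)) (s : PySem.Set String) (u : String) :
    (pvAdj G u).length + pvW G (PySem.Set.add s u) ≤ pvT G := by
  by_cases huV : u ∈ pvV G
  · have hperm : (pvV G).Perm (u :: (pvV G).filter (fun x => x != u)) := by
      have hnd := pvV_nodup G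
      have h := List.perm_cons_erase huV
      rwa [hnd.erase_eq_filter u] at h
    have hsum := (hperm.map (fun x => (pvAdj G x).length)).sum_eq
    simp only [List.map_cons, List.sum_cons] at hsum
    have hsub : pvW G (PySem.Set.add s u) ≤
        (((pvV G).filter (fun x => x != u)).map (fun x => (pvAdj G x).length)).sum := by
      rw [pvW, filter_add_eq]
      apply List.Sublist.sum_le_sum
      · apply List.Sublist.map
        rw [List.filter_comm]
        exact List.filter_sublist
      · intro a _; exact Nat.zero_le a
    rw [pvT, hsum]
    omega
  · have hadj : pvAdj G u = [] := pvAdj_nil_of_not_mem G u (fun h => huV ((mem_pvV G u).mpr h))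
    have hsub : pvW G (PySem.Set.add s u) ≤ pvT G := by
      rw [pvW, pvT]
      apply List.Sublist.sum_le_sum
      · exact List.Sublist.map _ List.filter_sublist
      · intro a _; exact Nat.zero_le a
    simp only [hadj, List.length_nil, Nat.zero_add]
    exact hsub

-- the frames invariant: every stacked vertex is mentioned in G or already seen
def pvGood (G : List (String × List String)) (s : PySem.Set String) (fr : List (String × List String)) : Prop :=
  ∀ x ∈ fr, x.1 ∈ pvVerts G ∨ x.1 ∈ s

-- MAIN: with enough fuel on both sides, B's stack loop computes the reference sequence
theorem pvMain (G : List (String × List String)) : ∀ (fB : Nat) (fA : Nat) (s : PySem.Set String)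
    (fr : List (String × List String)) (out : List (List String)),
    pvGood G s fr →
    fr.length + pvW G s + 1 ≤ fB →
    pvCardU G s + 1 ≤ fA →
    pvLoopB G fB s fr out = out ++ (pvGen G fA s fr).2.2 := by
  intro fB
  induction fB with
  | zero => intro fA s fr out _ hB _; omega
  | succ fB ih =>
    intro fA s fr out hgood hB hA
    match fr with
    | [] => simp [pvLoopB, pvGen]
    | (u, p) :: rest =>
      by_cases hc : u ∈ s
      · have h1 : pvLoopB G (fB + 1) s ((u, p) :: rest) out = pvLoopB G fB s rest out := by
          simp only [pvLoopB]
          rw [if_pos (by simp [hc])]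
        have h2 : pvGen G fA s ((u, p) :: rest) = pvGen G fA s rest := by
          simp only [pvGen]
          rw [if_pos (by simp [hc])]
        rw [h1, h2]
        apply ih fA s rest out
        · intro x hx; exact hgood x (List.mem_cons_of_mem _ hx)
        · simp only [List.length_cons] at hB; omega
        · exact hA
      · have huV : u ∈ pvV G := by
          rcases hgood (u, p) (List.mem_cons_self) with h | h
          · exact (mem_pvV G u).mpr h
          · exact absurd h hc
        obtain ⟨fA', rfl⟩ : ∃ fA', fA = fA' + 1 := ⟨fA - 1, by omega⟩
        have hcard := pvCardU_add G s u huV hc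
        have hw := pvW_add G s u huV hc
        set nf := (pvAdj G u).map (fun t => (t, p ++ [t])) with hnf
        have hvisit : pvVisitA G (fA' + 1) u s p = pvGen G fA' (PySem.Set.add s u) nf := by
          rw [pvVisitA.eq_def]
          exact pvLoopA_eq_pvGen G (pvAdj G u) fA' (PySem.Set.add s u) p
        have hfle : (pvGen G fA' (PySem.Set.add s u) nf).1 ≤ fA' := pvGen_fuel_le G nf fA' _
        have hL : pvLoopB G (fB + 1) s ((u, p) :: rest) out =
            pvLoopB G fB (PySem.Set.add s u) (nf ++ rest) (out ++ [p]) := by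
          simp only [pvLoopB]
          rw [if_neg (by simp [hc])]
        have hR : pvGen G (fA' + 1) s ((u, p) :: rest) =
            ((pvGen G (pvGen G fA' (PySem.Set.add s u) nf).1 (pvGen G fA' (PySem.Set.add s u) nf).2.1 rest).1,
             (pvGen G (pvGen G fA' (PySem.Set.add s u) nf).1 (pvGen G fA' (PySem.Set.add s u) nf).2.1 rest).2.1,
             p :: ((pvGen G fA' (PySem.Set.add s u) nf).2.2 ++
               (pvGen G (pvGen G fA' (PySem.Set.add s u) nf).1 (pvGen G fA' (PySem.Set.add s u) nf).2.1 rest).2.2)) := by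
          simp only [pvGen]
          rw [if_neg (by simp [hc])]
          rw [hvisit, Nat.min_eq_left (le_trans hfle (Nat.le_succ _))]
        have hstep : pvLoopB G fB (PySem.Set.add s u) (nf ++ rest) (out ++ [p]) =
            (out ++ [p]) ++ (pvGen G fA' (PySem.Set.add s u) (nf ++ rest)).2.2 := by
          apply ih
          · intro x hx
            rcases List.mem_append.mp hx with h | h
            · rw [hnf] at h
              obtain ⟨t, ht, hxt⟩ := List.mem_map.mp h
              exact Or.inl (hxt ▸ pvAdj_mem_verts G u t ht)
            · rcases hgood x (List.mem_cons_of_mem _ h) with h' | h'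
              · exact Or.inl h'
              · exact Or.inr ((PySem.Set.mem_add (s := s) (x := u) (y := x.1)).mpr (Or.inl h'))
          · have hlen : nf.length = (pvAdj G u).length := by rw [hnf, List.length_map]
            simp only [List.length_append, List.length_cons] at hB ⊢
            omega
          · omega
        rw [hL, hstep, pvGen_append, hR]
        simp

theorem DFS_eq_alt (G : List (String × List String)) (v : String) (seen : Option (List String)) (path : Option (List String)) :
    DFS G v seen path = DFS_alt G v seen path := by
  unfold DFS DFS_alt
  set s0 := PySem.Set.ofList (seen.getD []) with hs0
  set p0 := path.getD [v] with hp0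
  have hE : (pvVerts G).length + 2 = ((pvVerts G).length + 1) + 1 := rfl
  rw [hE]
  simp only [pvVisitA]
  rw [pvLoopA_eq_pvGen]
  symm
  rw [show ((pvVerts G).length + 1) + 1 = (pvVerts G).length + 2 from rfl]
  apply pvMain G ((pvVerts G).length + 2) ((pvVerts G).length + 1) (PySem.Set.add s0 v)
    ((pvAdj G v).map (fun t => (t, p0 ++ [t]))) []
  · intro x hx
    obtain ⟨t, ht, rfl⟩ := List.mem_map.mp hx
    exact Or.inl (pvAdj_mem_verts G v t ht)
  · have h1 := pvW_le_sub G s0 v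
    have h2 := pvT_le G
    simp only [List.length_map]
    omega
  · have := pvCardU_le G (PySem.Set.add s0 v)
    omega

-- ===== VERDICT (by name: the statement is the Claim_ definition above) =====
theorem DFS_spec : Claim_equal_DFS := by
  intro G v seen path _ _
  unfold Spec_DFS
  exact DFS_eq_alt G v seen path
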